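-- pv_equiv track=rewrite | github.com/koshelev-forwork/pygameProjectTetris | Tetris.py | do_board
-- ===== SOURCE A (Python) =====
-- def do_board(locked):
--     board = [[(0, 0, 0) for _ in range(10)] for _ in range(20)]
--     for i in range(len(board)):
--         for j in range(len(board[i])):
--             if (j, i) in locked:
--                 c = locked[(j, i)]
--                 board[i][j] = c
--     return board
-- ===== SOURCE B (Python) =====
-- def do_board(locked):
--     board = [[(0, 0, 0)] * 10 for _ in range(20)]
--     for (x, y), color in locked.items():
--         if 0 <= x < 10 and 0 <= y < 20:
--             board[y][x] = color
--     return board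
-- ===== Notes on version B (the rewrite author's own statement) =====
-- stated objective: idiomatic
-- what changed: Instead of A's nested scan over all 200 board cells with a membership test and lookup per cell, B creates the blank 20x10 board directly and makes a single pass over locked.items(), writing each in-bounds cell in place.
import Mathlib
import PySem

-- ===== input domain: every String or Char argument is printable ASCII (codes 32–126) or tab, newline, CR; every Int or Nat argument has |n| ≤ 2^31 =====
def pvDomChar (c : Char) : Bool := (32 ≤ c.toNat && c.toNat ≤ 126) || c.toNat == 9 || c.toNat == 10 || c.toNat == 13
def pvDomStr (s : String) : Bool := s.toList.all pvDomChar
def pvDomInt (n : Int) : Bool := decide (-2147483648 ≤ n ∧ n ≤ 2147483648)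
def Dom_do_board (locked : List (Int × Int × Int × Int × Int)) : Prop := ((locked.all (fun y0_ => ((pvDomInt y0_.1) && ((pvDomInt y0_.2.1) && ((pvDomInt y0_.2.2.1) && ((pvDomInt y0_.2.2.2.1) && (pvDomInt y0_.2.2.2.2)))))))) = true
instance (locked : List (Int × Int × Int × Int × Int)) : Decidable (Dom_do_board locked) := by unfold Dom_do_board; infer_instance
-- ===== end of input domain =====

-- B builds the blank 20x10 board and fills it in one pass over locked's items (in-bounds guard), instead of
-- scanning all 200 cells and testing each for membership in locked.


-- ===== PORT A =====
-- A: 20x10 comprehension of black cells; each cell (i,j) is then overwritten by locked[(j,i)]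
-- iff (j,i) is in locked.  The per-cell membership test + lookup on the association list is the
-- first matching entry (ported as List.find?); the in-place assignment of the visited cell is
-- ported as that cell's value.
def do_board (locked : List (Int × Int × Int × Int × Int)) : List (List (Int × Int × Int)) :=
  (PySem.List.pyRange 0 20 1).map (fun i =>
    (PySem.List.pyRange 0 10 1).map (fun j =>
      match locked.find? (fun t => t.1 == j && t.2.1 == i) with
      | some t => t.2.2
      | none => ((0 : Int), (0 : Int), (0 : Int))))

-- ===== PORT B =====
def do_board_alt (locked : List (Int × Int × Int × Int × Int)) : List (List (Int × Int × Int)) :=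
  locked.foldl
    (fun board t =>
      if 0 ≤ t.1 ∧ t.1 < 10 ∧ 0 ≤ t.2.1 ∧ t.2.1 < 20 then
        board.set t.2.1.toNat ((board[t.2.1.toNat]!).set t.1.toNat t.2.2)
      else board)
    (List.replicate 20 (List.replicate 10 ((0 : Int), (0 : Int), (0 : Int))))

-- ===== PRECONDITION & SPEC =====
-- Pre_ excludes lists whose (x, y) keys are not pairwise distinct: such a list cannot arise from the
-- Python dict argument (a dict literal collapses duplicate keys), and on it the association-list
-- reading is ambiguous (A's port reads the first match, B's port writes the last).
def Pre_do_board (locked : List (Int × Int × Int × Int × Int)) : Prop :=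
  (locked.map (fun t => (t.1, t.2.1))).Nodup
instance (locked : List (Int × Int × Int × Int × Int)) : Decidable (Pre_do_board locked) := by unfold Pre_do_board; infer_instance
def pvWitness_do_board : (List (Int × Int × Int × Int × Int)) := [(0, 0, 255, 255, 255), (3, 5, 1, 2, 3), (11, -1, 7, 7, 7)]
def Spec_do_board (locked : List (Int × Int × Int × Int × Int)) (out : List (List (Int × Int × Int))) : Prop := out = do_board_alt locked
instance (locked : List (Int × Int × Int × Int × Int)) (out : List (List (Int × Int × Int))) : Decidable (Spec_do_board locked out) := by unfold Spec_do_board; infer_instance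

-- ===== CLAIM (what is proved, stated in full; the proofs are below) =====
def Claim_equal_do_board : Prop := ∀ (locked : List (Int × Int × Int × Int × Int)), Dom_do_board locked → Pre_do_board locked → Spec_do_board locked (do_board locked)

-- ===== LEMMAS AND PROOFS =====

-- the value A leaves at board cell (row i, column j): the first entry of locked keyed (j, i), else black
def cellA (locked : List (Int × Int × Int × Int × Int)) (j i : Int) : Int × Int × Int :=
  match locked.find? (fun t => t.1 == j && t.2.1 == i) with
  | some t => t.2.2
  | none => ((0 : Int), (0 : Int), (0 : Int))

-- a 20x10 grid described by a cell function (column j, row i, as the Ints A's ranges produce)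
def mkGridZ (g : Int → Int → Int × Int × Int) : List (List (Int × Int × Int)) :=
  (List.range 20).map (fun i : Nat => (List.range 10).map (fun j : Nat => g (j : Int) (i : Int)))

theorem mkGridZ_congr {g g' : Int → Int → Int × Int × Int}
    (h : ∀ i : ℕ, i < 20 → ∀ j : ℕ, j < 10 → g (j : Int) (i : Int) = g' (j : Int) (i : Int)) :
    mkGridZ g = mkGridZ g' := by
  apply List.ext_getElem
  · simp only [mkGridZ, List.length_map, List.length_range]
  · intro i h1 h2
    simp only [mkGridZ, List.length_map, List.length_range] at h1
    simp only [mkGridZ, List.getElem_map, List.getElem_range]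
    apply List.ext_getElem
    · simp only [List.length_map, List.length_range]
    · intro j h3 h4
      simp only [List.length_map, List.length_range] at h3
      simp only [List.getElem_map, List.getElem_range]
      exact h i h1 j h3

theorem do_board_eq_mkGridZ (locked : List (Int × Int × Int × Int × Int)) :
    do_board locked = mkGridZ (cellA locked) := by
  unfold do_board mkGridZ cellA
  rw [show PySem.List.pyRange 0 20 1 = (List.range 20).map (fun k => (k : Int)) by decide,
      show PySem.List.pyRange 0 10 1 = (List.range 10).map (fun k => (k : Int)) by decide]
  simp only [List.map_map]
  rfl

theorem set_mkGridZ (g : Int → Int → Int × Int × Int) (y x : ℕ) (v : Int × Int × Int)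
    (hy : y < 20) (_hx : x < 10) :
    (mkGridZ g).set y (((mkGridZ g)[y]!).set x v)
      = mkGridZ (fun j i => if i = (y : Int) ∧ j = (x : Int) then v else g j i) := by
  have hlen : (mkGridZ g).length = 20 := by
    simp only [mkGridZ, List.length_map, List.length_range]
  have hget : (mkGridZ g)[y]! = (List.range 10).map (fun j : Nat => g (j : Int) (y : Int)) := by
    rw [getElem!_pos (mkGridZ g) y (by omega)]
    simp only [mkGridZ, List.getElem_map, List.getElem_range]
  rw [hget]
  apply List.ext_getElem
  · simp only [mkGridZ, List.length_set, List.length_map]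
  · intro i h1 h2
    simp only [mkGridZ, List.length_set, List.length_map, List.length_range] at h1
    rw [List.getElem_set]
    simp only [mkGridZ, List.getElem_map, List.getElem_range]
    by_cases hiy : y = i
    · subst hiy
      rw [if_pos rfl]
      apply List.ext_getElem
      · simp only [List.length_set, List.length_map]
      · intro j h3 h4
        simp only [List.length_set, List.length_map, List.length_range] at h3
        rw [List.getElem_set]
        simp only [List.getElem_map, List.getElem_range]
        by_cases hjx : x = j
        · subst hjx
          simp
        · have hne : (j : Int) ≠ (x : Int) := fun hc => hjx (by exact_mod_cast hc.symm)
          simp [hjx, hne]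
    · rw [if_neg hiy]
      refine List.map_congr_left (fun j hj => ?_)
      have hnc : ¬((i : Int) = (y : Int) ∧ (j : Int) = (x : Int)) :=
        fun hc => hiy (by exact_mod_cast hc.1.symm)
      rw [if_neg hnc]

theorem do_board_alt_eq_mkGridZ (locked : List (Int × Int × Int × Int × Int))
    (hnd : (locked.map (fun t => (t.1, t.2.1))).Nodup) :
    do_board_alt locked = mkGridZ (cellA locked) := by
  induction locked using List.reverseRecOn with
  | nil =>
    show List.replicate 20 (List.replicate 10 ((0 : Int), (0 : Int), (0 : Int))) = _
    decide
  | append_singleton l t ih =>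
    have hmap : ((l ++ [t]).map (fun t => (t.1, t.2.1)))
        = l.map (fun t => (t.1, t.2.1)) ++ [(t.1, t.2.1)] := by simp
    rw [hmap] at hnd
    have hndl : (l.map (fun t => (t.1, t.2.1))).Nodup := (List.nodup_append.mp hnd).1
    have hnotin : (t.1, t.2.1) ∉ l.map (fun t => (t.1, t.2.1)) := by
      have hd := List.disjoint_of_nodup_append hnd
      exact fun hm => hd hm (by simp)
    have hstep : do_board_alt (l ++ [t])
        = (if 0 ≤ t.1 ∧ t.1 < 10 ∧ 0 ≤ t.2.1 ∧ t.2.1 < 20 then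
            (do_board_alt l).set t.2.1.toNat (((do_board_alt l)[t.2.1.toNat]!).set t.1.toNat t.2.2)
          else do_board_alt l) := by
      unfold do_board_alt
      rw [List.foldl_append]
      rfl
    have hfindapp : ∀ j i : Int,
        (l ++ [t]).find? (fun u => u.1 == j && u.2.1 == i)
          = ((l.find? (fun u => u.1 == j && u.2.1 == i)).or
             ([t].find? (fun u => u.1 == j && u.2.1 == i))) := by
      intro j i; rw [List.find?_append]
    rw [hstep, ih hndl]
    by_cases hb : 0 ≤ t.1 ∧ t.1 < 10 ∧ 0 ≤ t.2.1 ∧ t.2.1 < 20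
    · rw [if_pos hb]
      obtain ⟨hx0, hx1, hy0, hy1⟩ := hb
      rw [set_mkGridZ (cellA l) t.2.1.toNat t.1.toNat t.2.2 (by omega) (by omega)]
      apply mkGridZ_congr
      intro i hi j hj
      by_cases hc : (i : Int) = (t.2.1.toNat : Int) ∧ (j : Int) = (t.1.toNat : Int)
      · rw [if_pos hc]
        obtain ⟨hci, hcj⟩ := hc
        rw [Int.toNat_of_nonneg hy0] at hci
        rw [Int.toNat_of_nonneg hx0] at hcj
        unfold cellA
        rw [hfindapp]
        have hl : l.find? (fun u => u.1 == (j : Int) && u.2.1 == (i : Int)) = none := by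
          rw [List.find?_eq_none]
          intro u hu hpu
          apply hnotin
          have h1 : u.1 = (j : Int) := by
            have := (Bool.and_eq_true _ _).mp hpu |>.1; exact by exact_mod_cast beq_iff_eq.mp this
          have h2 : u.2.1 = (i : Int) := by
            have := (Bool.and_eq_true _ _).mp hpu |>.2; exact by exact_mod_cast beq_iff_eq.mp this
          have : (t.1, t.2.1) = (u.1, u.2.1) := by rw [h1, h2, hcj, hci]
          rw [this]
          exact List.mem_map_of_mem hu
        rw [hl, Option.none_or]
        have hpt : (fun u : Int × Int × Int × Int × Int => u.1 == (j : Int) && u.2.1 == (i : Int)) t = true := by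
          simp [hcj.symm, hci.symm]
        simp [List.find?, hpt]
      · rw [if_neg hc]
        unfold cellA
        rw [hfindapp]
        have hpt : (fun u : Int × Int × Int × Int × Int => u.1 == (j : Int) && u.2.1 == (i : Int)) t = false := by
          by_contra h
          apply hc
          have h' := (Bool.and_eq_true _ _).mp (Bool.of_not_eq_false h)
          constructor
          · rw [Int.toNat_of_nonneg hy0]; exact (beq_iff_eq.mp h'.2).symm
          · rw [Int.toNat_of_nonneg hx0]; exact (beq_iff_eq.mp h'.1).symm
        simp [List.find?, hpt]
    · rw [if_neg hb]
      apply mkGridZ_congr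
      intro i hi j hj
      unfold cellA
      rw [hfindapp]
      have hpt : (fun u : Int × Int × Int × Int × Int => u.1 == (j : Int) && u.2.1 == (i : Int)) t = false := by
        by_contra h
        have h' := (Bool.and_eq_true _ _).mp (Bool.of_not_eq_false h)
        have h1 : t.1 = (j : Int) := beq_iff_eq.mp h'.1
        have h2 : t.2.1 = (i : Int) := beq_iff_eq.mp h'.2
        apply hb
        refine ⟨by omega, by omega, by omega, by omega⟩
      simp [List.find?, hpt]

-- ===== VERDICT (by name: the statement is the Claim_ definition above) =====
theorem do_board_spec : Claim_equal_do_board := by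
  intro locked _ hpre
  unfold Spec_do_board
  rw [do_board_eq_mkGridZ, do_board_alt_eq_mkGridZ locked hpre]
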